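-- pv_equiv track=rewrite | github.com/FilipeLopesPires/ContactListProcessor | contact-list-processor.py | removeOptionalFields
-- ===== SOURCE A (Python) =====
-- def removeOptionalFields(lines):
--     """
--     Remove non-mandatory fields from VCF lines, keeping only essential contact information.
--
--     Args:
--         lines (list): List of VCF file lines
--
--     Returns:
--         list: VCF lines with non-mandatory fields removed
--     """
--     lines_without_optional = []
--     current_contact = []
--
--     # Define mandatory fields that should be kept
--     mandatory_fields = {
--         "BEGIN:VCARD",
--         "END:VCARD",
--         "VERSION",
--         "FN",  # Formatted Name
--         "N",   # Name
--         "TEL"  # Telephone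
--     }
--
--     def is_mandatory_field(line):
--         """Check if a line contains a mandatory field."""
--         stripped = line.strip().upper()
--
--         # Check for exact matches first
--         if stripped in ["BEGIN:VCARD", "END:VCARD"]:
--             return True
--
--         # Check for field prefixes
--         for field in mandatory_fields:
--             if stripped.startswith(field):
--                 return True
--
--         # Handle TEL with TYPE parameters
--         if stripped.startswith("TEL;TYPE="):
--             return True
--
--         return False
--
--     # Process each contact
--     for line in lines:
--         if line.strip().upper() == "BEGIN:VCARD":
--             current_contact = [line]
--         elif line.strip().upper() == "END:VCARD":
--             current_contact.append(line)
--             lines_without_optional.extend(current_contact)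
--             lines_without_optional.append("\n")  # Add blank line between contacts
--             current_contact = []
--         else:
--             # Only keep mandatory fields
--             if is_mandatory_field(line):
--                 current_contact.append(line)
--             # Skip non-mandatory fields (BDAY, ADR, EMAIL, ORG, TITLE, etc.)
--
--     return lines_without_optional
-- ===== SOURCE B (Python) =====
-- MANDATORY_PREFIXES = ("BEGIN:VCARD", "END:VCARD", "VERSION", "FN", "N", "TEL")
--
-- def is_mandatory_field(line):
--     return line.strip().upper().startswith(MANDATORY_PREFIXES)
--
-- def removeOptionalFields(lines):
--     # Single reverse pass, building the output back-to-front: an END:VCARD opens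
--     # a block; collecting stops at the enclosing BEGIN:VCARD (the last one in the
--     # file, since earlier ones are discarded), at the previous END, or at the
--     # start of the input.
--     result = []
--     block = None  # the block currently being collected (backwards), or None
--     for line in reversed(lines):
--         key = line.strip().upper()
--         if key == "END:VCARD":
--             if block is not None:
--                 result = block + ["\n"] + result
--             block = [line]
--         elif block is not None:
--             if key == "BEGIN:VCARD":
--                 result = [line] + block + ["\n"] + result
--                 block = None
--             elif is_mandatory_field(line):
--                 block = [line] + block
--     if block is not None:
--         result = block + ["\n"] + result
--     return result
-- ===== Notes on version B (the rewrite author's own statement) =====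
-- stated objective: alternative
-- what changed: B traverses the input in REVERSE and builds the output back-to-front: an END:VCARD opens a block, collecting stops at the enclosing (last) BEGIN:VCARD, at the previous END, or at the input's start, so A's reset-the-buffer semantics falls out of the traversal order instead of being maintained forward; the three-stage mandatory test becomes a single startswith-tuple test.
import Mathlib
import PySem

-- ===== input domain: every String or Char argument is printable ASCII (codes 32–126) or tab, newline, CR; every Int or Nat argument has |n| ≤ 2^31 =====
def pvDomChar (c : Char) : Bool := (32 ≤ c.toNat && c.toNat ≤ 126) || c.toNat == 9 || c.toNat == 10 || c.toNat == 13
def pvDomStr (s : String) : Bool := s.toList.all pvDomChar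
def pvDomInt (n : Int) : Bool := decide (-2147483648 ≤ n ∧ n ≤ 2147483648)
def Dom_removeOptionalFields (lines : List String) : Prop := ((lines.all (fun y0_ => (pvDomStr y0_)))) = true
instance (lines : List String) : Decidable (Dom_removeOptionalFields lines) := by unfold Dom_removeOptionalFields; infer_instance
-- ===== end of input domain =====

-- B replaces A's forward filter-as-you-accumulate pass by a single REVERSE pass that builds the output back-to-front (alternative traversal order, same cost); A's three-stage mandatory test collapses to one any-prefix test.


-- ===== PORT A =====
-- A's inner helper is_mandatory_field: exact matches, then prefix scan over the set, then TEL;TYPE=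
def isMandatoryA (line : String) : Bool :=
  let stripped := PySem.Str.upper (PySem.Str.strip line)
  if stripped == "BEGIN:VCARD" || stripped == "END:VCARD" then true
  else if ["BEGIN:VCARD", "END:VCARD", "VERSION", "FN", "N", "TEL"].any
      (fun field => PySem.Str.startswith stripped field) then true
  else if PySem.Str.startswith stripped "TEL;TYPE=" then true
  else false

def removeOptionalFields (lines : List String) : List String :=
  (lines.foldl (fun (st : List String × List String) line =>
      let out := st.1
      let cur := st.2
      if PySem.Str.upper (PySem.Str.strip line) == "BEGIN:VCARD" then
        (out, [line])
      else if PySem.Str.upper (PySem.Str.strip line) == "END:VCARD" then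
        (out ++ (cur ++ [line]) ++ ["\n"], [])
      else if isMandatoryA line then (out, cur ++ [line]) else (out, cur))
    ([], [])).1

-- ===== PORT B =====
-- Python's str.startswith(tuple) is an any-over-the-tuple test
def isMandatoryB (line : String) : Bool :=
  ["BEGIN:VCARD", "END:VCARD", "VERSION", "FN", "N", "TEL"].any
    (fun p => PySem.Str.startswith (PySem.Str.upper (PySem.Str.strip line)) p)

def removeOptionalFields_alt (lines : List String) : List String :=
  -- reverse pass; state = (result built back-to-front, optional block being collected)
  let st := lines.reverse.foldl
    (fun (st : List String × Option (List String)) line =>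
      let key := PySem.Str.upper (PySem.Str.strip line)
      if key == "END:VCARD" then
        ((match st.2 with
          | some b => b ++ ["\n"] ++ st.1
          | none => st.1), some [line])
      else
        match st.2 with
        | some b =>
          if key == "BEGIN:VCARD" then (line :: (b ++ ["\n"] ++ st.1), none)
          else if isMandatoryB line then (st.1, some (line :: b))
          else st
        | none => st)
    ([], none)
  match st.2 with
  | some b => b ++ ["\n"] ++ st.1
  | none => st.1

-- ===== PRECONDITION & SPEC =====
def Spec_removeOptionalFields (lines : List String) (out : List String) : Prop := out = removeOptionalFields_alt lines
instance (lines : List String) (out : List String) : Decidable (Spec_removeOptionalFields lines out) := by unfold Spec_removeOptionalFields; infer_instance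

-- ===== CLAIM (what is proved, stated in full; the proofs are below) =====
def Claim_equal_removeOptionalFields : Prop := ∀ (lines : List String), Dom_removeOptionalFields lines → Spec_removeOptionalFields lines (removeOptionalFields lines)

-- ===== LEMMAS AND PROOFS =====

-- the prefix scan subsumes A's exact-match and TEL;TYPE= branches
lemma isMandatory_eq : isMandatoryA = isMandatoryB := by
  funext line
  unfold isMandatoryA isMandatoryB
  set s := PySem.Str.upper (PySem.Str.strip line) with hs
  set m := (["BEGIN:VCARD", "END:VCARD", "VERSION", "FN", "N", "TEL"].any
      (fun f => PySem.Str.startswith s f)) with hm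
  by_cases h1 : (s == "BEGIN:VCARD" || s == "END:VCARD") = true
  · rw [if_pos h1]
    have h1' : s = "BEGIN:VCARD" ∨ s = "END:VCARD" := by simpa using h1
    rcases h1' with h | h <;> rw [hm, h] <;> decide
  · rw [if_neg (by exact fun hc => h1 hc)]
    by_cases h2 : m = true
    · rw [if_pos h2, h2]
    · rw [if_neg (by exact fun hc => h2 hc)]
      have ht : PySem.Str.startswith s "TEL;TYPE=" = false := by
        by_contra hc
        rw [Bool.not_eq_false] at hc
        apply h2
        have htel : PySem.Str.startswith s "TEL" = true := by
          rw [PySem.Str.startswith_eq, PySem.Chars.startswith_iff] at hc ⊢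
          exact List.IsPrefix.trans (by decide) hc
        rw [hm]
        simp only [List.any_cons, List.any_nil, htel, Bool.or_true, Bool.or_false]
      rw [Bool.not_eq_true] at h2
      rw [ht, h2]
      decide

-- proof-side names for the two fold steps
def stepA (st : List String × List String) (line : String) : List String × List String :=
  if PySem.Str.upper (PySem.Str.strip line) == "BEGIN:VCARD" then (st.1, [line])
  else if PySem.Str.upper (PySem.Str.strip line) == "END:VCARD" then
    (st.1 ++ (st.2 ++ [line]) ++ ["\n"], [])
  else if isMandatoryB line then (st.1, st.2 ++ [line]) else (st.1, st.2)

def stepR (st : List String × Option (List String)) (line : String) :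
    List String × Option (List String) :=
  if PySem.Str.upper (PySem.Str.strip line) == "END:VCARD" then
    ((match st.2 with
      | some b => b ++ ["\n"] ++ st.1
      | none => st.1), some [line])
  else
    match st.2 with
    | some b =>
      if PySem.Str.upper (PySem.Str.strip line) == "BEGIN:VCARD" then
        (line :: (b ++ ["\n"] ++ st.1), none)
      else if isMandatoryB line then (st.1, some (line :: b))
      else st
    | none => st

-- R ls = the reverse fold over ls, computed head-recursively
def Rfun (ls : List String) : List String × Option (List String) :=
  ls.foldr (fun line st => stepR st line) ([], none)

lemma Rfun_eq_foldl (ls : List String) : ls.reverse.foldl stepR ([], none) = Rfun ls := by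
  rw [List.foldl_reverse]; rfl

-- finalization of a reverse-pass state relative to A's pending buffer β
def fin (β : List String) (st : List String × Option (List String)) : List String :=
  match st.2 with
  | some b => β ++ b ++ ["\n"] ++ st.1
  | none => st.1

-- main invariant: running A forward from state (out, β) over ls equals
-- out ++ (B's reverse-pass result over ls, finalized against β)
lemma main_inv (ls : List String) : ∀ (out β : List String),
    (ls.foldl stepA (out, β)).1 = out ++ fin β (Rfun ls) := by
  induction ls with
  | nil => intro out β; simp [Rfun, fin]
  | cons l ls ih =>
    intro out β
    have hR : Rfun (l :: ls) = stepR (Rfun ls) l := by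
      simp only [Rfun, List.foldr_cons]
    simp only [List.foldl_cons, hR]
    by_cases hE : (PySem.Str.upper (PySem.Str.strip l) == "END:VCARD") = true
    · have hB : (PySem.Str.upper (PySem.Str.strip l) == "BEGIN:VCARD") = false := by
        rw [beq_iff_eq] at hE; rw [hE]; decide
      simp only [stepA, stepR, hE, hB, if_true, if_false, Bool.false_eq_true]
      rw [ih]
      cases hblk : (Rfun ls).2 <;> simp [fin, hblk]
    · by_cases hBg : (PySem.Str.upper (PySem.Str.strip l) == "BEGIN:VCARD") = true
      · simp only [stepA, stepR, hE, hBg, if_true, if_false, Bool.false_eq_true]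
        rw [ih]
        cases hblk : (Rfun ls).2 <;> simp [fin, hblk]
      · simp only [stepA, stepR, hE, hBg, if_false, Bool.false_eq_true]
        by_cases hm : isMandatoryB l = true
        · simp only [hm, if_true]
          rw [ih]
          cases hblk : (Rfun ls).2 <;> simp [fin, hblk]
        · simp only [Bool.not_eq_true] at hm
          simp only [hm, if_false, Bool.false_eq_true]
          rw [ih]
          cases hblk : (Rfun ls).2 <;> simp [fin, hblk]

-- ===== VERDICT (by name: the statement is the Claim_ definition above) =====
theorem removeOptionalFields_spec : Claim_equal_removeOptionalFields := by
  intro lines _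
  unfold Spec_removeOptionalFields removeOptionalFields removeOptionalFields_alt
  rw [isMandatory_eq]
  show (lines.foldl stepA ([], [])).1
      = (match (lines.reverse.foldl stepR ([], none)).2 with
         | some b => b ++ ["\n"] ++ (lines.reverse.foldl stepR ([], none)).1
         | none => (lines.reverse.foldl stepR ([], none)).1)
  rw [Rfun_eq_foldl, main_inv]
  cases hblk : (Rfun lines).2 <;> simp [fin, hblk]
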